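-- pv_equiv track=rewrite | github.com/sudoStacks/retreivr | engine/import_pipeline.py | _normalized_tokens
-- ===== SOURCE A (Python) =====
-- from typing import Any
--
-- def _normalized_tokens(value: Any) -> set[str]:
--     text = str(value or "").strip().lower()
--     if not text:
--         return set()
--     cleaned = []
--     for ch in text:
--         cleaned.append(ch if (ch.isalnum() or ch.isspace()) else " ")
--     return {token for token in "".join(cleaned).split() if token}
-- ===== SOURCE B (Python) =====
-- from itertools import groupby
-- from typing import Any
--
-- def _normalized_tokens(value: Any) -> set[str]:
--     text = str(value or "").strip().lower()
--     if not text: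
--         return set()
--     return {"".join(group) for is_alnum, group in groupby(text, key=str.isalnum) if is_alnum}
-- ===== Notes on version B (the rewrite author's own statement) =====
-- stated objective: simpler
-- what changed: The tokens are exactly the maximal runs of alphanumeric characters, so B tokenizes in one itertools.groupby pass over the text instead of building a cleaned character list, joining it and re-splitting on whitespace (the isspace branch disappears).
import Mathlib
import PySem

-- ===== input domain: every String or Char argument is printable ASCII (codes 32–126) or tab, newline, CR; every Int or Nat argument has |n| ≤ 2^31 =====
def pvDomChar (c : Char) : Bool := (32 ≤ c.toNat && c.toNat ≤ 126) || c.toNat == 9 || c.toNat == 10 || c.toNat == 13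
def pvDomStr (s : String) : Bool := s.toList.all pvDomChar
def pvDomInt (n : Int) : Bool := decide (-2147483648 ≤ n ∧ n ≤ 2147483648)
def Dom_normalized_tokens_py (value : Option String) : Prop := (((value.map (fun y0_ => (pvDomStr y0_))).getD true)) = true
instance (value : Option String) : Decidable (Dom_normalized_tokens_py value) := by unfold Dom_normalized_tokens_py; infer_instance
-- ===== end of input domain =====

-- B tokenizes in one groupby-style pass over the maximal alphanumeric runs instead of
-- cleaning into a character list, joining and re-splitting on whitespace (objective: simpler).

-- ===== PORT A =====
def normalized_tokens_py (value : Option String) : List String :=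
  let text := PySem.Str.lower (PySem.Str.strip (value.getD ""))
  if text = "" then PySem.Set.empty
  else
    let cleaned := text.toList.foldl
      (fun acc ch => acc ++ [if PySem.Chars.isalnum ch || PySem.Chars.isspace ch then ch else ' ']) []
    PySem.Set.ofList ((PySem.Str.split₀ (String.ofList cleaned)).filter (fun t => !(t == "")))

-- ===== PORT B =====
-- one groupby(text, key=str.isalnum) pass: each maximal alnum run becomes one token
def pvAlnumRuns : List Char → List String
  | [] => []
  | c :: rest =>
    if h : PySem.Chars.isalnum c = true then
      String.ofList ((c :: rest).takeWhile PySem.Chars.isalnum) ::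
        pvAlnumRuns ((c :: rest).dropWhile PySem.Chars.isalnum)
    else pvAlnumRuns rest
  termination_by l => l.length
  decreasing_by
    · rw [List.dropWhile_cons_of_pos h]
      have := List.length_dropWhile_le PySem.Chars.isalnum rest
      simp; omega
    · simp

def normalized_tokens_py_alt (value : Option String) : List String :=
  let text := PySem.Str.lower (PySem.Str.strip (value.getD ""))
  if text = "" then PySem.Set.empty
  else PySem.Set.ofList (pvAlnumRuns text.toList)

-- ===== PRECONDITION & SPEC =====
def Spec_normalized_tokens_py (value : Option String) (out : List String) : Prop := out = normalized_tokens_py_alt value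
instance (value : Option String) (out : List String) : Decidable (Spec_normalized_tokens_py value out) := by unfold Spec_normalized_tokens_py; infer_instance

-- ===== CLAIM (what is proved, stated in full; the proofs are below) =====
def Claim_equal_normalized_tokens_py : Prop := ∀ (value : Option String), Dom_normalized_tokens_py value → Spec_normalized_tokens_py value (normalized_tokens_py value)

-- ===== LEMMAS AND PROOFS =====

-- A's cleaning map on one character
def pvClean (c : Char) : Char :=
  if PySem.Chars.isalnum c || PySem.Chars.isspace c then c else ' '

-- list-level version of pvAlnumRuns (tokens as List Char)
def pvCharRuns : List Char → List (List Char)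
  | [] => []
  | c :: rest =>
    if h : PySem.Chars.isalnum c = true then
      ((c :: rest).takeWhile PySem.Chars.isalnum) ::
        pvCharRuns ((c :: rest).dropWhile PySem.Chars.isalnum)
    else pvCharRuns rest
  termination_by l => l.length
  decreasing_by
    · rw [List.dropWhile_cons_of_pos h]
      have := List.length_dropWhile_le PySem.Chars.isalnum rest
      simp; omega
    · simp

theorem pvAlnumRuns_eq (l : List Char) :
    pvAlnumRuns l = (pvCharRuns l).map String.ofList := by
  induction l using pvCharRuns.induct with
  | case1 => simp [pvAlnumRuns, pvCharRuns]
  | case2 c rest h ih =>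
    rw [pvAlnumRuns, pvCharRuns, dif_pos h, dif_pos h, List.map_cons, ih]
  | case3 c rest h ih =>
    rw [pvAlnumRuns, pvCharRuns, dif_neg h, dif_neg h, ih]

theorem pv_isalnum_not_isspace (c : Char) (h : PySem.Chars.isalnum c = true) :
    PySem.Chars.isspace c = false := by
  have hb : (48 ≤ c.toNat ∧ c.toNat ≤ 57) ∨ (65 ≤ c.toNat ∧ c.toNat ≤ 90) ∨
      (97 ≤ c.toNat ∧ c.toNat ≤ 122) := by
    simp only [PySem.Chars.isalnum, PySem.Chars.isalpha, PySem.Chars.isdigit,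
      PySem.Chars.isupper, PySem.Chars.islower, Bool.or_eq_true, Bool.and_eq_true,
      decide_eq_true_eq, Char.le_def, UInt32.le_iff_toNat_le] at h
    rcases h with (⟨h1, h2⟩ | ⟨h1, h2⟩) | ⟨h1, h2⟩
    · right; left; exact ⟨h1, h2⟩
    · right; right; exact ⟨h1, h2⟩
    · left; exact ⟨h1, h2⟩
  simp only [PySem.Chars.isspace, Bool.or_eq_false_iff, Bool.and_eq_false_iff,
    decide_eq_false_iff_not]
  simp only [Char.toNat] at hb ⊢
  omega

theorem pv_isspace_clean (c : Char) :
    PySem.Chars.isspace (pvClean c) = !PySem.Chars.isalnum c := by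
  unfold pvClean
  by_cases ha : PySem.Chars.isalnum c = true
  · simp [ha, pv_isalnum_not_isspace c ha]
  · by_cases hs : PySem.Chars.isspace c = true
    · simp [ha, hs]
    · simp only [Bool.not_eq_true] at ha hs
      simp [ha, hs]
      decide

theorem pv_clean_of_alnum (c : Char) (h : PySem.Chars.isalnum c = true) : pvClean c = c := by
  simp [pvClean, h]

theorem pvCharRuns_cons_neg (c : Char) (rest : List Char)
    (h : PySem.Chars.isalnum c = false) : pvCharRuns (c :: rest) = pvCharRuns rest := by
  rw [pvCharRuns, dif_neg (by simp [h])]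

-- characterization of split₀.go on a cleaned list, with the running word all-alnum
theorem pv_go_spec (l : List Char) : ∀ (cur : List Char) (acc : List (List Char)),
    (∀ c ∈ cur, PySem.Chars.isalnum c = true) →
    PySem.Chars.split₀.go (l.map pvClean) cur acc =
      acc.reverse ++
        (if cur = [] then pvCharRuns l
         else (cur.reverse ++ l.takeWhile PySem.Chars.isalnum) ::
           pvCharRuns (l.dropWhile PySem.Chars.isalnum)) := by
  induction l with
  | nil =>
    intro cur acc _
    cases cur with
    | nil => simp [PySem.Chars.split₀.go, pvCharRuns]
    | cons d ds => simp [PySem.Chars.split₀.go, pvCharRuns]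
  | cons c rest ih =>
    intro cur acc hcur
    by_cases h : PySem.Chars.isalnum c = true
    · -- alnum char: extends the current word
      have hc : pvClean c = c := pv_clean_of_alnum c h
      have hsp : PySem.Chars.isspace c = false := pv_isalnum_not_isspace c h
      have hstep : PySem.Chars.split₀.go ((c :: rest).map pvClean) cur acc
          = PySem.Chars.split₀.go (rest.map pvClean) (c :: cur) acc := by
        rw [List.map_cons, hc, PySem.Chars.split₀.go, if_neg (by simp [hsp])]
      rw [hstep, ih (c :: cur) acc (by
        intro d hd
        rcases List.mem_cons.mp hd with rfl | hd'
        · exact h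
        · exact hcur _ hd')]
      rw [if_neg (by simp)]
      cases cur with
      | nil =>
        rw [if_pos rfl, pvCharRuns, dif_pos h]
        simp [List.takeWhile_cons_of_pos h, List.dropWhile_cons_of_pos h]
      | cons d ds =>
        rw [if_neg (by simp)]
        simp [List.takeWhile_cons_of_pos h, List.dropWhile_cons_of_pos h]
    · -- non-alnum char: cleaned to whitespace, ends the current word
      have hb : PySem.Chars.isalnum c = false := by simpa using h
      have hsp : PySem.Chars.isspace (pvClean c) = true := by
        rw [pv_isspace_clean, hb]; rfl
      cases cur with
      | nil =>
        have hstep : PySem.Chars.split₀.go ((c :: rest).map pvClean) [] acc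
            = PySem.Chars.split₀.go (rest.map pvClean) [] acc := by
          rw [List.map_cons, PySem.Chars.split₀.go, if_pos hsp, if_pos (by simp)]
        rw [hstep, ih [] acc (by intro d hd; cases hd), if_pos rfl, if_pos rfl,
          pvCharRuns_cons_neg c rest hb]
      | cons d ds =>
        have hstep : PySem.Chars.split₀.go ((c :: rest).map pvClean) (d :: ds) acc
            = PySem.Chars.split₀.go (rest.map pvClean) [] ((d :: ds).reverse :: acc) := by
          rw [List.map_cons, PySem.Chars.split₀.go, if_pos hsp, if_neg (by simp)]
        rw [hstep, ih [] ((d :: ds).reverse :: acc) (by intro e he; cases he),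
          if_pos rfl, if_neg (by simp),
          List.takeWhile_cons_of_neg (by simp [hb]),
          List.dropWhile_cons_of_neg (by simp [hb]),
          pvCharRuns_cons_neg c rest hb]
        simp

theorem pv_split₀_clean (l : List Char) :
    PySem.Chars.split₀ (l.map pvClean) = pvCharRuns l := by
  unfold PySem.Chars.split₀
  rw [pv_go_spec l [] [] (by intro c hc; cases hc)]
  simp

theorem pv_charRuns_ne_nil (l : List Char) : ∀ t ∈ pvCharRuns l, t ≠ [] := by
  induction l using pvCharRuns.induct with
  | case1 => intro t ht; simp [pvCharRuns] at ht
  | case2 c rest h ih =>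
    intro t ht
    rw [pvCharRuns, dif_pos h] at ht
    rcases List.mem_cons.mp ht with rfl | ht'
    · simp [List.takeWhile_cons_of_pos h]
    · exact ih _ ht'
  | case3 c rest h ih =>
    intro t ht
    rw [pvCharRuns, dif_neg h] at ht
    exact ih _ ht

-- A's foldl-append cleaning equals mapping pvClean
theorem pv_foldl_clean (l : List Char) : ∀ (acc : List Char),
    l.foldl (fun acc ch =>
      acc ++ [if PySem.Chars.isalnum ch || PySem.Chars.isspace ch then ch else ' ']) acc
      = acc ++ l.map pvClean := by
  induction l with
  | nil => intro acc; simp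
  | cons c rest ih =>
    intro acc
    simp only [List.foldl_cons, List.map_cons, ih]
    simp [pvClean]

-- the A-side token list equals the B-side run list
theorem pv_tokens_eq (l : List Char) :
    (PySem.Str.split₀ (String.ofList (l.map pvClean))).filter (fun t => !(t == ""))
      = pvAlnumRuns l := by
  have hsplit : PySem.Str.split₀ (String.ofList (l.map pvClean))
      = (pvCharRuns l).map String.ofList := by
    have h1 := PySem.Str.split₀_map_toList (String.ofList (l.map pvClean))
    rw [String.toList_ofList, pv_split₀_clean] at h1
    have h2 : List.map String.toList ((pvCharRuns l).map String.ofList) = pvCharRuns l := by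
      rw [List.map_map]
      simp [Function.comp_def, String.toList_ofList]
    exact (List.map_injective_iff.mpr (fun a b hab => String.toList_inj.mp hab)) (h1.trans h2.symm)
  rw [hsplit, pvAlnumRuns_eq, List.filter_map]
  congr 1
  apply List.filter_eq_self.mpr
  intro t ht
  have hne : String.ofList t ≠ "" := fun hc =>
    pv_charRuns_ne_nil l t ht (by simpa [String.toList_ofList] using congrArg String.toList hc)
  simp [hne]

-- ===== VERDICT (by name: the statement is the Claim_ definition above) =====
theorem normalized_tokens_py_spec : Claim_equal_normalized_tokens_py := by
  intro value _
  unfold Spec_normalized_tokens_py normalized_tokens_py normalized_tokens_py_alt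
  by_cases h : PySem.Str.lower (PySem.Str.strip (value.getD "")) = ""
  · rw [if_pos h, if_pos h]
  · simp only [if_neg h, pv_foldl_clean, List.nil_append, pv_tokens_eq]
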